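-- pv_equiv track=rewrite | github.com/Sur818/Coding-Projects | python programming/hetrogenious sort5.py | sort_basedondigit
-- ===== SOURCE A (Python) =====
-- def sort_basedondigit(l):
-- 	odd_=sorted([i for i in l if i%2!=0],key=lambda x:int(str(x)[0]))
-- 	k=0
-- 	for i in range(len(l)):
-- 		if l[i]%2!=0:
-- 			l[i]=odd_[k]
-- 			k+=1
-- 	return l
-- ===== SOURCE B (Python) =====
-- def sort_basedondigit(l):
--     # Bucket-sort the odd elements by first digit (10 stable buckets instead of a
--     # comparison sort), then rebuild the list element-wise, splicing the result
--     # back into l (same in-place mutation as A); equivalence is about the return value.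
--     buckets = [[] for _ in range(10)]
--     for x in l:
--         if x % 2 != 0:
--             buckets[int(str(x)[0])].append(x)
--     it = iter([x for b in buckets for x in b])
--     l[:] = [next(it) if x % 2 != 0 else x for x in l]
--     return l
-- ===== Notes on version B (the rewrite author's own statement) =====
-- stated objective: alternative
-- what changed: The comparison sort of the odd elements is replaced by a 10-bucket distribution sort on the first-digit key (stable by bucket append), and the index-by-index overwrite loop with a counter is replaced by an element-wise rebuild of the list from an iterator over the concatenated buckets.
import Mathlib
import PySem

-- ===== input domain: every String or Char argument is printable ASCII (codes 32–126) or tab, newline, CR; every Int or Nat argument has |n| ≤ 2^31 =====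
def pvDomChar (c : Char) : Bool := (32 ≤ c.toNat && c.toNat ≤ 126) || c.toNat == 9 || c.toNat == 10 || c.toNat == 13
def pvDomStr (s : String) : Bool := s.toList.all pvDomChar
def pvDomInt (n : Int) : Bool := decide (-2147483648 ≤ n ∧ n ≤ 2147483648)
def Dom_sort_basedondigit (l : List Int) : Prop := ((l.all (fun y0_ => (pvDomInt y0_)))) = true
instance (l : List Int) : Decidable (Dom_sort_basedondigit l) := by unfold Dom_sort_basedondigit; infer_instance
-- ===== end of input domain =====

-- B replaces the comparison sort of the odd elements by a 10-bucket distribution sort and the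
-- index-by-index overwrite loop by an element-wise rebuild (objective: alternative algorithm).
-- Both Pythons mutate l in place and return it; the theorems are about the return value.

-- int() of the first character of str(x) — the key expression both Pythons literally share
-- (int()'s ValueError case, which occurs exactly for negative x whose first character is '-',
-- is excluded by Pre_)
def pvKey (x : Int) : Int :=
  match PySem.Str.pyGet? (PySem.Int.toStr x) 0 with
  | some c => (PySem.Int.ofStr? (String.ofList [c])).getD 0
  | none => 0   -- unreachable: str(x) is never empty

-- ===== PORT A =====
def sort_basedondigit (l : List Int) : List Int :=
  let odd_ := PySem.List.sorted (l.filter fun i => decide (PySem.Int.mod i 2 ≠ 0)) pvKey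
  let st := (PySem.List.pyRange 0 (PySem.List.len l) 1).foldl
    (fun (st : List Int × Int) i =>
      if PySem.Int.mod (PySem.List.pyGetD st.1 i 0) 2 ≠ 0 then
        (PySem.List.pySetD st.1 i (PySem.List.pyGetD odd_ st.2 0), st.2 + 1)
      else st) (l, 0)
  st.1

-- ===== PORT B =====
def sort_basedondigit_alt (l : List Int) : List Int :=
  let buckets := l.foldl
    (fun bs x =>
      if PySem.Int.mod x 2 ≠ 0 then
        PySem.List.pySetD bs (pvKey x) (PySem.List.pyGetD bs (pvKey x) [] ++ [x])
      else bs)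
    (List.replicate 10 ([] : List Int))
  -- 'it = iter([x for b in buckets for x in b])': next(it) is head/tail of the rest
  -- '[next(it) if x % 2 != 0 else x for x in l]' as a left fold building the output
  let st := l.foldl
    (fun (st : List Int × List Int) x =>
      if PySem.Int.mod x 2 ≠ 0 then (st.1 ++ [st.2.headD 0], st.2.tail)
      else (st.1 ++ [x], st.2)) ([], buckets.flatMap id)
  st.1

-- ===== PRECONDITION & SPEC =====
-- Pre_ excludes lists containing a negative odd element: there int() of the first character
-- of str(x), which is '-', raises ValueError in A (and likewise in B).
def Pre_sort_basedondigit (l : List Int) : Prop :=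
  ∀ x ∈ l, PySem.Int.mod x 2 ≠ 0 → 0 ≤ x
instance (l : List Int) : Decidable (Pre_sort_basedondigit l) := by
  unfold Pre_sort_basedondigit; infer_instance
def pvWitness_sort_basedondigit : List Int := [3, 12, 25, 1]

def Spec_sort_basedondigit (l : List Int) (out : List Int) : Prop := out = sort_basedondigit_alt l
instance (l : List Int) (out : List Int) : Decidable (Spec_sort_basedondigit l out) := by unfold Spec_sort_basedondigit; infer_instance

-- ===== CLAIM (what is proved, stated in full; the proofs are below) =====
def Claim_equal_sort_basedondigit : Prop := ∀ (l : List Int), Dom_sort_basedondigit l → Pre_sort_basedondigit l → Spec_sort_basedondigit l (sort_basedondigit l)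

-- ===== LEMMAS AND PROOFS =====

-- every character str(n) produces (non-negative n) is a decimal digit character
theorem pv_toDigitsCore_mem (f : Nat) : ∀ (n : Nat) (acc : List Char) (c : Char),
    c ∈ Nat.toDigitsCore 10 f n acc → c ∈ acc ∨ ∃ m, m < 10 ∧ c = Nat.digitChar m := by
  induction f with
  | zero => intro n acc c hc; exact Or.inl hc
  | succ f ih =>
    intro n acc c hc
    simp only [Nat.toDigitsCore] at hc
    by_cases h : n / 10 = 0
    · simp [h] at hc
      rcases hc with h1 | h1
      · exact Or.inr ⟨n % 10, Nat.mod_lt _ (by norm_num), h1⟩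
      · exact Or.inl h1
    · simp [h] at hc
      rcases ih _ _ _ hc with h1 | h1
      · rcases List.mem_cons.mp h1 with h2 | h2
        · exact Or.inr ⟨n % 10, Nat.mod_lt _ (by norm_num), h2⟩
        · exact Or.inl h2
      · exact Or.inr h1

theorem pv_toDigitsCore_ne_nil (f : Nat) : ∀ (n : Nat) (acc : List Char),
    Nat.toDigitsCore 10 (f + 1) n acc ≠ [] := by
  induction f with
  | zero => intro n acc; simp only [Nat.toDigitsCore]; split <;> simp
  | succ f ih =>
    intro n acc
    simp only [Nat.toDigitsCore]
    split
    · simp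
    · exact ih _ _

theorem pv_digit_val (m : Nat) (hm : m < 10) :
    (PySem.Int.ofStr? (String.ofList [Nat.digitChar m])).getD 0 = (m : Int) := by
  interval_cases m <;> decide

theorem pvKey_bounds (x : Int) (hx : 0 ≤ x) : 0 ≤ pvKey x ∧ pvKey x < 10 := by
  unfold pvKey
  have htl : (PySem.Int.toStr x).toList = Nat.toDigits 10 x.toNat := by
    rw [PySem.Int.toList_toStr]
    simp [PySem.Int.toChars, not_lt.mpr hx]
  have hne : Nat.toDigits 10 x.toNat ≠ [] := pv_toDigitsCore_ne_nil _ _ _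
  obtain ⟨c, rest, hcr⟩ := List.exists_cons_of_ne_nil hne
  have hget : PySem.Str.pyGet? (PySem.Int.toStr x) 0 = some c := by
    rw [PySem.Str.pyGet?_eq, htl, hcr]
    simp [PySem.Chars.pyGet?, PySem.List.pyGet?, PySem.List.pyIdx?]
  rw [hget]
  have hmem : c ∈ Nat.toDigits 10 x.toNat := by rw [hcr]; simp
  rcases pv_toDigitsCore_mem _ _ _ _ hmem with h | ⟨m, hm, rfl⟩
  · simp at h
  · simp only [pv_digit_val m hm]
    constructor <;> [positivity; exact_mod_cast hm]

theorem pv_insertBy_cons (before : Int → Int → Bool) (x y : Int) (ys : List Int) :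
    PySem.List.insertBy before x (y :: ys) =
      if before x y then x :: y :: ys else y :: PySem.List.insertBy before x ys := by
  rfl

theorem pv_insertBy_append (before : Int → Int → Bool) (x : Int) (P S : List Int)
    (h : ∀ y ∈ P, before x y = false) :
    PySem.List.insertBy before x (P ++ S) = P ++ PySem.List.insertBy before x S := by
  induction P with
  | nil => rfl
  | cons y ys ih =>
    simp only [List.cons_append, pv_insertBy_cons, h y (by simp), if_false, Bool.false_eq_true]
    rw [ih (fun z hz => h z (by simp [hz]))]

theorem pv_insertBy_all (before : Int → Int → Bool) (x : Int) (S : List Int)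
    (h : ∀ y ∈ S, before x y = true) :
    PySem.List.insertBy before x S = x :: S := by
  cases S with
  | nil => rfl
  | cons y ys => simp [pv_insertBy_cons, h y (by simp)]

-- appending x (whose key is the top bucket k) extends the concatenation of buckets 0..k by [x]
theorem pv_flatMap_filter_append_top (key : Int → Int) (xs : List Int) (x : Int) (k : Nat)
    (hk : key x = (k : Int)) :
    (List.range (k + 1)).flatMap (fun (d : Nat) => (xs ++ [x]).filter (fun y => key y == (d : Int))) =
      (List.range (k + 1)).flatMap (fun (d : Nat) => xs.filter (fun y => key y == (d : Int))) ++ [x] := by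
  rw [List.range_succ]
  simp only [List.flatMap_append, List.flatMap_cons, List.flatMap_nil, List.append_nil]
  have h1 : (List.range k).flatMap (fun (d : Nat) => (xs ++ [x]).filter (fun y => key y == (d : Int))) =
      (List.range k).flatMap (fun (d : Nat) => xs.filter (fun y => key y == (d : Int))) := by
    apply List.flatMap_congr
    intro d hd
    rw [List.filter_append]
    have : (List.filter (fun y => key y == ((d : Nat) : Int)) [x]) = [] := by
      simp only [List.filter_cons, List.filter_nil, beq_iff_eq, hk]
      rw [if_neg]
      simp only [List.mem_range] at hd
      omega
    rw [this, List.append_nil]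
  have h2 : ((xs ++ [x]).filter (fun y => key y == ((k : Nat) : Int))) =
      (xs.filter (fun y => key y == ((k : Nat) : Int))) ++ [x] := by
    rw [List.filter_append]
    congr 1
    simp [hk]
  rw [h1, h2, List.append_assoc]

-- stable sort with keys in [0,10) = concatenation of the 10 key buckets
theorem pv_bucket_sorted (key : Int → Int) (xs : List Int)
    (h : ∀ x ∈ xs, 0 ≤ key x ∧ key x < 10) :
    PySem.List.sorted xs key =
      (List.range 10).flatMap (fun (d : Nat) => xs.filter (fun x => key x == (d : Int))) := by
  rw [PySem.List.sorted_eq_foldl_insertBy]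
  induction xs using List.reverseRecOn with
  | nil => simp
  | append_singleton xs x ih =>
    have hxs : ∀ y ∈ xs, 0 ≤ key y ∧ key y < 10 := fun y hy => h y (by simp [hy])
    obtain ⟨hx0, hx10⟩ := h x (by simp)
    rw [List.foldl_append, List.foldl_cons, List.foldl_nil, ih hxs]
    set k : Nat := (key x).toNat with hk
    have hkx : key x = (k : Int) := by omega
    have hk10 : k < 10 := by omega
    have hsplit : List.range 10 = List.range (k + 1) ++ (List.range (10 - (k + 1))).map (fun (j : Nat) => (k + 1) + j) := by
      rw [← List.range_add]; congr 1; omega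
    rw [hsplit]
    simp only [List.flatMap_append, List.flatMap_map]
    rw [pv_insertBy_append, pv_insertBy_all]
    · rw [pv_flatMap_filter_append_top key xs x k hkx]
      have hS : ((List.range (10 - (k + 1))).flatMap
            (fun (a : Nat) => (xs ++ [x]).filter (fun y => key y == (((k + 1 + a : Nat)) : Int)))) =
          ((List.range (10 - (k + 1))).flatMap
            (fun (a : Nat) => xs.filter (fun y => key y == (((k + 1 + a : Nat)) : Int)))) := by
        apply List.flatMap_congr
        intro a ha
        rw [List.filter_append]
        have : (List.filter (fun y => key y == ((k + 1 + a : Nat) : Int)) [x]) = [] := by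
          simp only [List.filter_cons, List.filter_nil, beq_iff_eq, hkx]
          rw [if_neg]
          omega
        rw [this, List.append_nil]
      rw [hS]
      simp
    · intro y hy
      simp only [List.mem_flatMap, List.mem_range] at hy
      obtain ⟨a, ha, hyf⟩ := hy
      have hkey := (List.mem_filter.mp hyf).2
      simp only [beq_iff_eq] at hkey
      simp only [decide_eq_true_eq]
      omega
    · intro y hy
      simp only [List.mem_flatMap, List.mem_range] at hy
      obtain ⟨d, hd, hyf⟩ := hy
      have hkey := (List.mem_filter.mp hyf).2
      simp only [beq_iff_eq] at hkey
      simp only [decide_eq_false_iff_not]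
      omega

theorem pv_set_map_range (f : Nat → List Int) (n k : Nat) (v : List Int) (hk : k < n) :
    ((List.range n).map f).set k v =
      (List.range n).map (fun (d : Nat) => if d = k then v else f d) := by
  apply List.ext_getElem
  · simp
  · intro i h1 h2
    simp only [List.length_set, List.length_map, List.length_range] at h1
    rw [List.getElem_set]
    simp only [List.getElem_map, List.getElem_range]
    rcases eq_or_ne k i with rfl | h
    · simp
    · simp [h, h.symm]

-- the bucket-building fold produces exactly these 10 filters
theorem pv_buckets_fold (key : Int → Int) (xs : List Int)
    (h : ∀ x ∈ xs, 0 ≤ key x ∧ key x < 10) :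
    xs.foldl (fun bs x => PySem.List.pySetD bs (key x) (PySem.List.pyGetD bs (key x) [] ++ [x]))
        (List.replicate 10 ([] : List Int)) =
      (List.range 10).map (fun (d : Nat) => xs.filter (fun x => key x == (d : Int))) := by
  induction xs using List.reverseRecOn with
  | nil =>
    apply List.ext_getElem
    · simp
    · intro i h1 h2; simp
  | append_singleton xs x ih =>
    have hxs : ∀ y ∈ xs, 0 ≤ key y ∧ key y < 10 := fun y hy => h y (by simp [hy])
    obtain ⟨hx0, hx10⟩ := h x (by simp)
    rw [List.foldl_append, List.foldl_cons, List.foldl_nil, ih hxs]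
    set k : Nat := (key x).toNat with hk
    have hkx : key x = (k : Int) := by omega
    have hk10 : k < 10 := by omega
    have hlen : (((List.range 10).map (fun (d : Nat) => xs.filter (fun x => key x == (d : Int)))).length : Int) = 10 := by simp
    rw [PySem.List.pySetD_of_nonneg _ _ hx0,
        PySem.List.pyGetD_eq_getElem _ _ hx0 (by rw [hlen]; omega)]
    simp only [hkx, Int.toNat_natCast]
    rw [List.getElem_map, pv_set_map_range _ _ _ _ hk10]
    · apply List.map_congr_left
      intro d hd
      rw [List.filter_append]
      by_cases hdk : d = k
      · subst hdk
        simp only [List.getElem_range]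
        congr 1
        simp [hkx]
      · rw [if_neg hdk]
        have : (List.filter (fun y => key y == ((d : Nat) : Int)) [x]) = [] := by
          simp only [List.filter_cons, List.filter_nil, beq_iff_eq, hkx]
          rw [if_neg]
          simp only [List.mem_range] at hd
          omega
        rw [this, List.append_nil]

theorem pv_getD_drop (xs : List Int) (k : Int) (hk : 0 ≤ k) :
    PySem.List.pyGetD xs k 0 = (xs.drop k.toNat).headD 0 := by
  rw [PySem.List.pyGetD, PySem.List.pyGet?_of_nonneg _ hk]
  rw [List.headD_eq_head?_getD, List.head?_drop]

-- reference recursion: the rebuilt list, consuming the queue at the odd elements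
def pvScatter : List Int → List Int → List Int
  | [], _ => []
  | x :: xs, q =>
    if PySem.Int.mod x 2 ≠ 0 then q.headD 0 :: pvScatter xs q.tail
    else x :: pvScatter xs q

theorem pvScatter_cons (x : Int) (xs q : List Int) :
    pvScatter (x :: xs) q =
      if PySem.Int.mod x 2 ≠ 0 then q.headD 0 :: pvScatter xs q.tail
      else x :: pvScatter xs q := rfl

-- A's indexed overwrite fold computes pvScatter
theorem pv_A_scatter (q : List Int) : ∀ (cur P : List Int) (k : Int), 0 ≤ k →
    ((PySem.List.pyRange (P.length : Int) ((P.length : Int) + (cur.length : Int)) 1).foldl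
      (fun (st : List Int × Int) i =>
        if PySem.Int.mod (PySem.List.pyGetD st.1 i 0) 2 ≠ 0 then
          (PySem.List.pySetD st.1 i (PySem.List.pyGetD q st.2 0), st.2 + 1)
        else st) (P ++ cur, k)).1 = P ++ pvScatter cur (q.drop k.toNat) := by
  intro cur
  induction cur with
  | nil =>
    intro P k hk
    rw [PySem.List.pyRange_one_eq_nil (by simp)]
    simp [pvScatter]
  | cons x xs ih =>
    intro P k hk
    have hlen : ((P.length : Int) + ((x :: xs).length : Int)) = ((P.length : Int) + 1) + (xs.length : Int) := by
      simp only [List.length_cons]; push_cast; ring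
    rw [hlen, PySem.List.pyRange_one_cons (by omega), List.foldl_cons]
    have hget : PySem.List.pyGetD (P ++ x :: xs) (P.length : Int) 0 = x := by
      rw [PySem.List.pyGetD_eq_getElem _ _ (by positivity) (by simp)]
      simp only [Int.toNat_natCast]
      rw [List.getElem_append_right (le_refl _)]
      simp
    rw [hget]
    by_cases hodd : PySem.Int.mod x 2 ≠ 0
    · rw [if_pos hodd]
      have hset : PySem.List.pySetD (P ++ x :: xs) (P.length : Int) (PySem.List.pyGetD q k 0) =
          (P ++ [PySem.List.pyGetD q k 0]) ++ xs := by
        rw [PySem.List.pySetD_of_nonneg _ _ (by positivity)]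
        simp only [Int.toNat_natCast]
        rw [List.set_append_right _ _ (le_refl _)]
        simp
      rw [hset]
      have hP1 : ((P ++ [PySem.List.pyGetD q k 0]).length : Int) = (P.length : Int) + 1 := by
        simp
      have := ih (P ++ [PySem.List.pyGetD q k 0]) (k + 1) (by omega)
      rw [hP1] at this
      rw [this]
      have hdrop : q.drop (k + 1).toNat = (q.drop k.toNat).tail := by
        rw [List.tail_drop]
        congr 1
        omega
      rw [hdrop, pv_getD_drop _ _ hk, pvScatter_cons, if_pos hodd]
      simp
    · rw [if_neg hodd]
      have hPx : P ++ x :: xs = (P ++ [x]) ++ xs := by simp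
      rw [hPx]
      have hP1 : ((P ++ [x]).length : Int) = (P.length : Int) + 1 := by simp
      have := ih (P ++ [x]) k hk
      rw [hP1] at this
      rw [this, pvScatter_cons, if_neg hodd]
      simp

-- B's rebuilding fold computes pvScatter
theorem pv_B_scatter : ∀ (l acc q : List Int),
    (l.foldl (fun (st : List Int × List Int) x =>
        if PySem.Int.mod x 2 ≠ 0 then (st.1 ++ [st.2.headD 0], st.2.tail)
        else (st.1 ++ [x], st.2)) (acc, q)).1 = acc ++ pvScatter l q := by
  intro l
  induction l with
  | nil => intro acc q; simp [pvScatter]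
  | cons x xs ih =>
    intro acc q
    rw [List.foldl_cons]
    by_cases hodd : PySem.Int.mod x 2 ≠ 0
    · rw [if_pos hodd, ih, pvScatter_cons, if_pos hodd]
      simp
    · rw [if_neg hodd, ih, pvScatter_cons, if_neg hodd]
      simp

theorem pv_main (l : List Int) (hpre : ∀ x ∈ l, PySem.Int.mod x 2 ≠ 0 → 0 ≤ x) :
    sort_basedondigit l = sort_basedondigit_alt l := by
  unfold sort_basedondigit sort_basedondigit_alt
  dsimp only
  have hb : ∀ x ∈ l.filter (fun i => decide (PySem.Int.mod i 2 ≠ 0)),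
      0 ≤ pvKey x ∧ pvKey x < 10 := by
    intro x hx
    have hm := List.mem_filter.mp hx
    exact pvKey_bounds x (hpre x hm.1 (by simpa using hm.2))
  set odds := l.filter (fun i => decide (PySem.Int.mod i 2 ≠ 0)) with hodds
  -- B's bucket fold builds the 10 filters of the odd sublist
  have hfold : l.foldl
      (fun bs x =>
        if PySem.Int.mod x 2 ≠ 0 then
          PySem.List.pySetD bs (pvKey x) (PySem.List.pyGetD bs (pvKey x) [] ++ [x])
        else bs)
      (List.replicate 10 ([] : List Int)) =
      (List.range 10).map (fun (d : Nat) => odds.filter (fun x => pvKey x == (d : Int))) := by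
    rw [PySem.List.foldl_ite_eq_foldl_filter (fun x => PySem.Int.mod x 2 ≠ 0)]
    exact pv_buckets_fold pvKey odds hb
  rw [hfold]
  -- B's concatenated buckets = A's stably sorted odd list
  have hord : ((List.range 10).map
        (fun (d : Nat) => odds.filter (fun x => pvKey x == (d : Int)))).flatMap id =
      PySem.List.sorted odds pvKey := by
    rw [pv_bucket_sorted pvKey odds hb, List.flatMap_map]
    rfl
  rw [hord]
  set odd_ := PySem.List.sorted odds pvKey with hodd_
  -- both scatter phases compute pvScatter l odd_
  have hA := pv_A_scatter odd_ l [] 0 (le_refl 0)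
  simp only [List.length_nil, Nat.cast_zero, Int.toNat_zero, List.drop_zero, List.nil_append,
    zero_add] at hA
  have hB := pv_B_scatter l [] odd_
  simp only [List.nil_append] at hB
  rw [PySem.List.len_eq] at *
  rw [hA, hB]

-- ===== VERDICT (by name: the statement is the Claim_ definition above) =====
theorem sort_basedondigit_spec : Claim_equal_sort_basedondigit := by
  intro l _hdom hpre
  unfold Spec_sort_basedondigit
  exact pv_main l hpre
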